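-- pv_equiv track=rewrite | github.com/coding-plus-equals-one/meeting-materials-2022-2023 | lists/solutions.py | split_gold
-- ===== SOURCE A (Python) =====
-- def split_gold(golds):
--     a = []
--     b = []
--     for i in range(len(golds)):
--         if i % 2 == 0:
--             if golds[0] >= golds[-1]:
--                 a.append(golds[0])
--                 golds.pop(0)
--             else:
--                 a.append(golds[-1])
--                 golds.pop(-1)
--         else:
--             if golds[0] >= golds[-1]:
--                 b.append(golds[0])
--                 golds.pop(0)
--             else:
--                 b.append(golds[-1])
--                 golds.pop(-1)
--
--     return [sum(a), sum(b)]
-- ===== SOURCE B (Python) =====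
-- def split_gold(golds):
--     # Two-pointer scan over the untouched list (A empties its argument; only
--     # the return value is matched).
--     lo, hi = 0, len(golds) - 1
--     s = [0, 0]
--     turn = 0
--     while lo <= hi:
--         if golds[lo] >= golds[hi]:
--             s[turn] += golds[lo]
--             lo += 1
--         else:
--             s[turn] += golds[hi]
--             hi -= 1
--         turn ^= 1
--     return s
-- ===== Notes on version B (the rewrite author's own statement) =====
-- stated objective: faster
-- what changed: Replaced repeated list.pop(0)/pop(-1) mutation (each pop(0) is O(n)) with a two-pointer index scan accumulating the two sums directly, leaving the input list untouched.
import Mathlib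
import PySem

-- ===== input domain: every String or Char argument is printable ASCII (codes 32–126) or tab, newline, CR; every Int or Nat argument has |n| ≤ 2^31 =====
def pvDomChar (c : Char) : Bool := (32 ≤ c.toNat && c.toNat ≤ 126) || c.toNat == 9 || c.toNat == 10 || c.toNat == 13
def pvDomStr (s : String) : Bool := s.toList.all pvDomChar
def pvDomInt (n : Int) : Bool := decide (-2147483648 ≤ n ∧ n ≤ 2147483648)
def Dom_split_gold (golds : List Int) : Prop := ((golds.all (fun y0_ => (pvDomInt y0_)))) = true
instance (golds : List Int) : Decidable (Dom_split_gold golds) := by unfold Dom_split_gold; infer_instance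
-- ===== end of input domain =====

-- B replaces A's quadratic pop(0)/pop(-1) mutation loop by a linear two-pointer
-- scan; A empties its argument list in place, B leaves it alone — the theorem
-- is about the RETURN value only.

-- ===== PORT A =====
-- A's for-loop over range(len(golds)); the list shrinks by one each step, so the
-- remaining iteration count equals the list length.  golds[0] → pyGetD 0,
-- golds[-1] → pyGetD (-1), pop(0) → tail, pop(-1) → dropLast.
def splitGoldLoopA (fuel : Nat) (i : Nat) (lst a b : List Int) : List Int :=
  match fuel with
  | 0 => [a.sum, b.sum]
  | fuel + 1 =>
    let first := PySem.List.pyGetD lst 0 0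
    let last := PySem.List.pyGetD lst (-1) 0
    if i % 2 == 0 then
      if first ≥ last then
        splitGoldLoopA fuel (i + 1) lst.tail (a ++ [first]) b
      else
        splitGoldLoopA fuel (i + 1) lst.dropLast (a ++ [last]) b
    else
      if first ≥ last then
        splitGoldLoopA fuel (i + 1) lst.tail a (b ++ [first])
      else
        splitGoldLoopA fuel (i + 1) lst.dropLast a (b ++ [last])

def split_gold (golds : List Int) : List Int :=
  splitGoldLoopA golds.length 0 golds [] []

-- ===== PORT B =====
-- B's while lo <= hi loop; runs exactly golds.length times, used as fuel.
def splitGoldLoopB (fuel : Nat) (golds : List Int) (lo hi : Int) (turn : Nat)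
    (s0 s1 : Int) : List Int :=
  match fuel with
  | 0 => [s0, s1]
  | fuel + 1 =>
    if lo ≤ hi then
      let gl := PySem.List.pyGetD golds lo 0
      let gh := PySem.List.pyGetD golds hi 0
      if gl ≥ gh then
        splitGoldLoopB fuel golds (lo + 1) hi (turn ^^^ 1)
          (if turn = 0 then s0 + gl else s0) (if turn = 0 then s1 else s1 + gl)
      else
        splitGoldLoopB fuel golds lo (hi - 1) (turn ^^^ 1)
          (if turn = 0 then s0 + gh else s0) (if turn = 0 then s1 else s1 + gh)
    else
      [s0, s1]

def split_gold_alt (golds : List Int) : List Int :=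
  splitGoldLoopB golds.length golds 0 ((golds.length : Int) - 1) 0 0 0

-- ===== PRECONDITION & SPEC =====
def Spec_split_gold (golds : List Int) (out : List Int) : Prop := out = split_gold_alt golds
instance (golds : List Int) (out : List Int) : Decidable (Spec_split_gold golds out) := by unfold Spec_split_gold; infer_instance

-- ===== CLAIM (what is proved, stated in full; the proofs are below) =====
def Claim_equal_split_gold : Prop := ∀ (golds : List Int), Dom_split_gold golds → Spec_split_gold golds (split_gold golds)

-- ===== LEMMAS AND PROOFS =====

-- Invariant: A's remaining list is the slice golds[lo..hi] of the original list.
theorem splitGold_loop_eq (k : Nat) : ∀ (golds : List Int) (lo hi : Int) (i : Nat)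
    (a b : List Int), 0 ≤ lo → hi < (golds.length : Int) → hi + 1 - lo = (k : Int) →
    splitGoldLoopA k i ((golds.drop lo.toNat).take k) a b
      = splitGoldLoopB k golds lo hi (i % 2) a.sum b.sum := by
  induction k with
  | zero => intros; rfl
  | succ k ih =>
    intro golds lo hi i a b hlo hhi hk
    have hlen : lo.toNat + (k + 1) ≤ golds.length := by omega
    have hllen : ((golds.drop lo.toNat).take (k + 1)).length = k + 1 := by
      simp [List.length_take, List.length_drop]; omega
    -- the two end elements of the slice are golds[lo] and golds[hi]
    have hgl : PySem.List.pyGetD ((golds.drop lo.toNat).take (k + 1)) 0 0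
        = PySem.List.pyGetD golds lo 0 := by
      rw [PySem.List.pyGetD_zero, PySem.List.pyGetD_eq_getElem golds 0 hlo (by omega)]
      rw [List.getD_eq_getElem?_getD, List.getElem?_take_of_lt (by omega), List.getElem?_drop]
      rw [List.getElem?_eq_getElem (by omega)]
      simp
    have hgh : PySem.List.pyGetD ((golds.drop lo.toNat).take (k + 1)) (-1) 0
        = PySem.List.pyGetD golds hi 0 := by
      rw [PySem.List.pyGetD_neg_ofNat _ 1 0 (by omega) (by omega),
          PySem.List.pyGetD_eq_getElem golds 0 (by omega) hhi]
      apply Option.some.inj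
      rw [← List.getElem?_eq_getElem, ← List.getElem?_eq_getElem, hllen]
      have h1 : k + 1 - 1 = k := rfl
      rw [h1, List.getElem?_take_of_lt (by omega), List.getElem?_drop]
      congr 1; omega
    -- tail and dropLast of the slice are the narrowed slices
    have htail : ((golds.drop lo.toNat).take (k + 1)).tail
        = (golds.drop (lo + 1).toNat).take k := by
      rw [← List.drop_one, List.drop_take, List.drop_drop]
      have h1 : lo.toNat + 1 = (lo + 1).toNat := by omega
      rw [h1]; norm_num
    have hdlast : ((golds.drop lo.toNat).take (k + 1)).dropLast
        = (golds.drop lo.toNat).take k := by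
      rw [List.dropLast_eq_take, List.take_take]
      congr 1
      rw [hllen]; omega
    have hcond : lo ≤ hi := by omega
    simp only [splitGoldLoopA, splitGoldLoopB, hgl, hgh, if_pos hcond]
    rcases Nat.mod_two_eq_zero_or_one i with h2 | h2
    · have h2' : (i + 1) % 2 = 1 := by omega
      by_cases hge : PySem.List.pyGetD golds lo 0 ≥ PySem.List.pyGetD golds hi 0
      · simp only [h2, hge, if_pos, beq_self_eq_true]
        rw [htail]
        have := ih golds (lo + 1) hi (i + 1) (a ++ [PySem.List.pyGetD golds lo 0]) b
          (by omega) hhi (by omega)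
        simpa [h2', List.sum_append] using this
      · simp only [h2, hge, beq_self_eq_true, if_true, if_false]
        rw [hdlast]
        have := ih golds lo (hi - 1) (i + 1) (a ++ [PySem.List.pyGetD golds hi 0]) b
          hlo (by omega) (by omega)
        simpa [h2', List.sum_append] using this
    · have h2' : (i + 1) % 2 = 0 := by omega
      have hne : (i % 2 == 0) = false := by simp [h2]
      by_cases hge : PySem.List.pyGetD golds lo 0 ≥ PySem.List.pyGetD golds hi 0
      · simp only [h2, hge, if_true]
        rw [htail]
        have := ih golds (lo + 1) hi (i + 1) a (b ++ [PySem.List.pyGetD golds lo 0])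
          (by omega) hhi (by omega)
        simpa [h2', List.sum_append] using this
      · simp only [h2, hge, if_false]
        rw [hdlast]
        have := ih golds lo (hi - 1) (i + 1) a (b ++ [PySem.List.pyGetD golds hi 0])
          hlo (by omega) (by omega)
        simpa [h2', List.sum_append] using this
theorem split_gold_spec' (golds : List Int) : split_gold golds = split_gold_alt golds := by
  have h := splitGold_loop_eq golds.length golds 0 ((golds.length : Int) - 1) 0 [] []
    (by omega) (by omega) (by omega)
  simpa [split_gold, split_gold_alt] using h

-- ===== VERDICT (by name: the statement is the Claim_ definition above) =====
theorem split_gold_spec : Claim_equal_split_gold := by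
  intro golds _
  exact split_gold_spec' golds
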